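-- pv_equiv track=rewrite | github.com/juanplopes/sketches | countmin_product.py | real
-- ===== SOURCE A (Python) =====
-- import shakespeare, sys, mmh3, math, collections, heapq, statistics
--
-- def real(works):
--     real = {}
--     for i in range(len(works)):
--         for j in range(i+1, len(works)):
--             name1, words1 = works[i]
--             name2, words2 = works[j]
--
--             dic1 = collections.Counter(words1)
--             dic2 = collections.Counter(words2)
--
--             real[(name1, name2)] = sum(v*dic2[k] for k,v in dic1.items())
--     return real
-- ===== SOURCE B (Python) =====
-- import collections
--
-- def _pair_products(postings):
--     # all ((idx_a, idx_b), count_a*count_b) for positions a < b, recursively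
--     if not postings:
--         return []
--     (ia, ca), rest = postings[0], postings[1:]
--     return [((ia, ib), ca * cb) for ib, cb in rest] + _pair_products(rest)
--
-- def real(works):
--     # inverted index: word -> list of (work_index, count), indices increasing
--     index = {}
--     for idx, (_, words) in enumerate(works):
--         for w, c in collections.Counter(words).items():
--             index.setdefault(w, []).append((idx, c))
--     # accumulate each word's cross products onto its index pairs
--     dots = {}
--     for postings in index.values():
--         for key, v in _pair_products(postings):
--             dots[key] = dots.get(key, 0) + v
--     # emit every pair in A's order
--     out = {}
--     n = len(works)
--     for i in range(n):
--         for j in range(i + 1, n):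
--             out[(works[i][0], works[j][0])] = dots.get((i, j), 0)
--     return out
-- ===== Notes on version B (the rewrite author's own statement) =====
-- stated objective: faster
-- what changed: B replaces A's per-pair Counter construction and dot products by a single inverted index mapping each word to its (work_index, count) postings, accumulating every pair's dot product word by word from cross products of postings, then emitting all pairs in A's order.
import Mathlib
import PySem

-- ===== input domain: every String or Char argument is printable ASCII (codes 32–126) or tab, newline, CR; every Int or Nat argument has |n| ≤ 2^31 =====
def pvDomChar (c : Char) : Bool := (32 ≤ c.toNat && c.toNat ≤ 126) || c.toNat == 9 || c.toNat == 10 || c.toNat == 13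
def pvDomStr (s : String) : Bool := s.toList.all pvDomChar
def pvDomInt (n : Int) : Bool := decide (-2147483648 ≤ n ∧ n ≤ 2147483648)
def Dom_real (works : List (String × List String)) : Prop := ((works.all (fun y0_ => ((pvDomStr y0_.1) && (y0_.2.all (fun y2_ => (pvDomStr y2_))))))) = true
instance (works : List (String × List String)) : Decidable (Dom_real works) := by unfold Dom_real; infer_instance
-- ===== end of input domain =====

-- B replaces A's per-pair Counter dot products by a single inverted index (word -> (work, count) postings) whose
-- per-word cross products are accumulated onto index pairs; objective: faster (measured).

-- ===== PORT A =====
def real (works : List (String × List String)) : List (String × String × Int) :=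
  ((PySem.List.pyRange 0 (PySem.List.len works) 1).foldl (fun acc i =>
      (PySem.List.pyRange (i+1) (PySem.List.len works) 1).foldl (fun acc j =>
        let p1 := PySem.List.pyGetD works i ("", [])
        let p2 := PySem.List.pyGetD works j ("", [])
        let dic1 := PySem.Dict.counter p1.2
        let dic2 := PySem.Dict.counter p2.2
        acc.insert (p1.1, p2.1) (dic1.items.foldl (fun s kv => s + kv.2 * dic2.getD kv.1 0) 0)) acc)
    (PySem.Dict.empty : PySem.Dict (String × String) Int)).items.map (fun p => (p.1.1, p.1.2, p.2))

-- ===== PORT B =====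
-- _pair_products: all ((idx_a, idx_b), count_a*count_b) for positions a < b, recursively
def pairProducts : List (Int × Int) → List ((Int × Int) × Int)
  | [] => []
  | p :: rest => (rest.map (fun q => ((p.1, q.1), p.2 * q.2))) ++ pairProducts rest

-- inverted index: word -> list of (work_index, count), built work by work
def indexB (works : List (String × List String)) : PySem.Dict String (List (Int × Int)) :=
  (PySem.List.enumerate works 0).foldl (fun d p =>
      (PySem.Dict.counter p.2.2).items.foldl (fun d kv =>
        d.modify kv.1 [] (fun l => l ++ [(p.1, kv.2)])) d)
    PySem.Dict.empty

-- accumulate each word's cross products onto its index pairs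
def dotsB (works : List (String × List String)) : PySem.Dict (Int × Int) Int :=
  (indexB works).values.foldl (fun d ps =>
      (pairProducts ps).foldl (fun d kv => d.insert kv.1 (d.getD kv.1 0 + kv.2)) d)
    PySem.Dict.empty

def real_alt (works : List (String × List String)) : List (String × String × Int) :=
  ((PySem.List.pyRange 0 (PySem.List.len works) 1).foldl (fun acc i =>
      (PySem.List.pyRange (i+1) (PySem.List.len works) 1).foldl (fun acc j =>
        acc.insert ((PySem.List.pyGetD works i ("", [])).1, (PySem.List.pyGetD works j ("", [])).1)
          ((dotsB works).getD (i, j) 0)) acc)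
    (PySem.Dict.empty : PySem.Dict (String × String) Int)).items.map (fun p => (p.1.1, p.1.2, p.2))

-- ===== PRECONDITION & SPEC =====
def Spec_real (works : List (String × List String)) (out : List (String × String × Int)) : Prop := out = real_alt works
instance (works : List (String × List String)) (out : List (String × String × Int)) : Decidable (Spec_real works out) := by unfold Spec_real; infer_instance

-- ===== CLAIM (what is proved, stated in full; the proofs are below) =====
def Claim_equal_real : Prop := ∀ (works : List (String × List String)), Dom_real works → Spec_real works (real works)

-- ===== LEMMAS AND PROOFS =====

-- the per-word lookup of an accumulated count in a postings list
def lookI (ps : List (Int × Int)) (i : Int) : Int := ((ps.filter (fun p => p.1 == i)).map (·.2)).sum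

-- total contribution of one postings list to the pair key k
def Sk (k : Int × Int) (ps : List (Int × Int)) : Int :=
  (((pairProducts ps).filter (fun kv => kv.1 == k)).map (·.2)).sum

-- the flat contribution stream behind indexB, with enumeration starting at s
def streamB (works : List (String × List String)) (s : Int) : List (String × (Int × Int)) :=
  (PySem.List.enumerate works s).flatMap
    (fun p => (PySem.Dict.counter p.2.2).items.map (fun kv => (kv.1, (p.1, kv.2))))

-- the postings list of word w
def PwB (works : List (String × List String)) (s : Int) (w : String) : List (Int × Int) :=
  ((streamB works s).filter (fun q => q.1 == w)).map (·.2)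

theorem foldl_foldl_flatMap {α β σ : Type} (l : List α) (g : α → List β) (f : σ → β → σ) (init : σ) :
    l.foldl (fun s a => (g a).foldl f s) init = (l.flatMap g).foldl f init := by
  induction l generalizing init with
  | nil => rfl
  | cons x l ih => simp [List.flatMap_cons, List.foldl_append, ih]

theorem indexB_eq (works : List (String × List String)) :
    indexB works = (streamB works 0).foldl (fun d q => d.modify q.1 [] (· ++ [q.2])) PySem.Dict.empty := by
  unfold indexB streamB
  rw [← foldl_foldl_flatMap]
  apply PySem.List.foldl_congr_mem
  intro acc p _
  rw [List.foldl_map]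

theorem getD_indexB (works : List (String × List String)) (w : String) :
    (indexB works).getD w [] = PwB works 0 w := by
  rw [indexB_eq, PySem.Dict.getD_foldl_modify_append, PySem.Dict.getD_empty]
  rfl

theorem keys_indexB (works : List (String × List String)) :
    (indexB works).keys = PySem.Set.ofList ((streamB works 0).map (·.1)) := by
  rw [indexB_eq]
  rw [PySem.Dict.keys_foldl_modify_key (streamB works 0) (·.1) [] (fun _ q => (· ++ [q.2]))]
  rw [PySem.Dict.keys_empty, PySem.Set.update_nil_left]

theorem nodup_keys_indexB (works : List (String × List String)) : (indexB works).keys.Nodup := by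
  rw [indexB_eq]
  exact PySem.Dict.nodup_keys_foldl_modify_key (streamB works 0) (·.1) [] (fun _ q => (· ++ [q.2]))
    PySem.Dict.empty (by simp [PySem.Dict.keys_empty])

theorem getD_foldl_addinsert {κ : Type} [BEq κ] [LawfulBEq κ] [DecidableEq κ]
    (l : List (κ × Int)) (d : PySem.Dict κ Int) (k : κ) :
    (l.foldl (fun d p => d.insert p.1 (d.getD p.1 0 + p.2)) d).getD k 0
      = d.getD k 0 + ((l.filter (fun p => p.1 == k)).map (·.2)).sum := by
  induction l generalizing d with
  | nil => simp
  | cons p l ih =>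
    simp only [List.foldl_cons, ih, List.filter_cons]
    by_cases h : p.1 = k
    · simp [h]; ring
    · simp [h, PySem.Dict.getD_insert, Ne.symm h]

theorem sum_filter_map_flatMap {α β : Type} (l : List α) (g : α → List (β × Int)) (p : β × Int → Bool) :
    (((l.flatMap g).filter p).map (·.2)).sum
      = (l.map (fun a => (((g a).filter p).map (·.2)).sum)).sum := by
  induction l with
  | nil => rfl
  | cons x l ih => simp [List.flatMap_cons, List.filter_append, ih]

theorem dotsB_getD (works : List (String × List String)) (k : Int × Int) :
    (dotsB works).getD k 0 = ((indexB works).values.map (Sk k)).sum := by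
  unfold dotsB
  rw [foldl_foldl_flatMap, getD_foldl_addinsert, PySem.Dict.getD_empty, zero_add,
    sum_filter_map_flatMap]
  rfl

theorem lookI_append (a b : List (Int × Int)) (i : Int) :
    lookI (a ++ b) i = lookI a i + lookI b i := by
  simp [lookI, List.filter_append]

theorem lookI_eq_zero (ps : List (Int × Int)) (i : Int) (h : ∀ p ∈ ps, p.1 ≠ i) :
    lookI ps i = 0 := by
  have : ps.filter (fun p => p.1 == i) = [] := by
    rw [List.filter_eq_nil_iff]; intro p hp; simpa using h p hp
  simp [lookI, this]

theorem Sk_eq_lookI (ps : List (Int × Int)) (hps : List.Pairwise (fun p q => p.1 < q.1) ps)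
    (i j : Int) (hij : i < j) : Sk (i, j) ps = lookI ps i * lookI ps j := by
  induction ps with
  | nil => simp [Sk, lookI, pairProducts]
  | cons p rest ih =>
    rcases List.pairwise_cons.mp hps with ⟨hlt, hrest⟩
    have hcomp : ((fun kv : (Int × Int) × Int => kv.1 == (i, j)) ∘
        (fun q : Int × Int => ((p.1, q.1), p.2 * q.2))) = (fun q : Int × Int => p.1 == i && q.1 == j) := rfl
    have hSk : Sk (i, j) (p :: rest)
        = ((rest.filter (fun q : Int × Int => p.1 == i && q.1 == j)).map (fun q => p.2 * q.2)).sum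
          + Sk (i, j) rest := by
      simp only [Sk, pairProducts, List.filter_append, List.map_append, List.sum_append,
        List.filter_map, hcomp, List.map_map]
      rfl
    rw [hSk, ih hrest]
    have hLci : lookI (p :: rest) i = (if p.1 = i then p.2 else 0) + lookI rest i := by
      by_cases h : p.1 = i <;> simp [lookI, h]
    have hLcj : lookI (p :: rest) j = (if p.1 = j then p.2 else 0) + lookI rest j := by
      by_cases h : p.1 = j <;> simp [lookI, h]
    by_cases hpi : p.1 = i
    · subst hpi
      have hri : ∀ q ∈ rest, q.1 ≠ p.1 := fun q hq => by have := hlt q hq; omega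
      have h1 : lookI rest p.1 = 0 := lookI_eq_zero rest p.1 hri
      have hfeq : rest.filter (fun q : Int × Int => p.1 == p.1 && q.1 == j)
          = rest.filter (fun q : Int × Int => q.1 == j) := by
        apply List.filter_congr; intro q _; simp
      have hsum : ((rest.filter (fun q : Int × Int => q.1 == j)).map (fun q => p.2 * q.2)).sum
          = p.2 * lookI rest j := List.sum_map_mul_left _ _ _
      have hpj : p.1 ≠ j := by omega
      rw [hfeq, hsum, hLci, hLcj, h1]
      simp [hpj]
    · have hfeq : rest.filter (fun q : Int × Int => p.1 == i && q.1 == j) = [] := by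
        rw [List.filter_eq_nil_iff]; intro q _; simp [hpi]
      rw [hfeq, hLci, hLcj]
      by_cases hpj : p.1 = j
      · have hri : ∀ q ∈ rest, q.1 ≠ i := fun q hq => by have := hlt q hq; omega
        have h1 : lookI rest i = 0 := lookI_eq_zero rest i hri
        have hji : j ≠ i := by omega
        rw [h1]; simp [hpj, hji]
      · simp [hpi, hpj]

theorem PwB_cons (x : String × List String) (works : List (String × List String)) (s : Int) (w : String) :
    PwB (x :: works) s w
      = (if w ∈ x.2 then [(s, (x.2.count w : Int))] else []) ++ PwB works (s + 1) w := by
  have hstream : streamB (x :: works) s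
      = (PySem.Dict.counter x.2).items.map (fun kv => (kv.1, (s, kv.2))) ++ streamB works (s + 1) := by
    simp [streamB, PySem.List.enumerate_cons, List.flatMap_cons]
  unfold PwB
  rw [hstream, List.filter_append, List.map_append]
  congr 1
  rw [PySem.Dict.items_counter, List.map_map, List.filter_map, List.map_map]
  have hfil : (PySem.Set.ofList x.2).filter
      ((fun q : String × Int × Int => q.1 == w) ∘ ((fun kv : String × Int => (kv.1, (s, kv.2))) ∘ fun k => (k, (x.2.count k : Int))))
      = (PySem.Set.ofList x.2).filter (· == w) := by
    apply List.filter_congr; intro k _; rfl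
  rw [hfil, List.filter_beq]
  by_cases hw : w ∈ x.2
  · have h1 : (PySem.Set.ofList x.2).count w = 1 :=
      List.count_eq_one_of_mem (PySem.Set.nodup_ofList x.2) ((PySem.Set.mem_ofList x.2 w).mpr hw)
    simp [hw]
  · have h0 : (PySem.Set.ofList x.2).count w = 0 :=
      List.count_eq_zero_of_not_mem (fun hc => hw ((PySem.Set.mem_ofList x.2 w).mp hc))
    simp [h0, hw]

theorem PwB_firsts (works : List (String × List String)) (s : Int) (w : String) :
    ∀ q ∈ PwB works s w, s ≤ q.1 := by
  induction works generalizing s with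
  | nil => intro q hq; simp [PwB, streamB, PySem.List.enumerate_nil] at hq
  | cons x works ih =>
    intro q hq
    rw [PwB_cons] at hq
    rcases List.mem_append.mp hq with h | h
    · split at h <;> simp_all
    · have := ih (s + 1) q h; omega

theorem PwB_pairwise (works : List (String × List String)) (s : Int) (w : String) :
    List.Pairwise (fun p q : Int × Int => p.1 < q.1) (PwB works s w) := by
  induction works generalizing s with
  | nil => simp [PwB, streamB, PySem.List.enumerate_nil]
  | cons x works ih =>
    rw [PwB_cons]
    rw [List.pairwise_append]
    refine ⟨?_, ih (s + 1), ?_⟩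
    · split <;> simp
    · intro a ha b hb
      have hb' := PwB_firsts works (s + 1) w b hb
      split at ha <;> simp_all

theorem lookI_PwB (works : List (String × List String)) (w : String) :
    ∀ (s : Int) (t : Nat) (ht : t < works.length),
      lookI (PwB works s w) (s + (t : Int)) = ((works[t]'ht).2.count w : Int) := by
  induction works with
  | nil => intro s t ht; simp at ht
  | cons x works ih =>
    intro s t ht
    rw [PwB_cons, lookI_append]
    have htail0 : ∀ i : Int, i < s + 1 → lookI (PwB works (s + 1) w) i = 0 := by
      intro i hi
      apply lookI_eq_zero
      intro p hp
      have := PwB_firsts works (s + 1) w p hp; omega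
    cases t with
    | zero =>
      have hhead : lookI (if w ∈ x.2 then [(s, (x.2.count w : Int))] else []) (s + (0 : Nat))
          = (x.2.count w : Int) := by
        by_cases hw : w ∈ x.2
        · simp [hw, lookI]
        · have : x.2.count w = 0 := List.count_eq_zero_of_not_mem hw
          simp [hw, lookI, this]
      rw [hhead, htail0 (s + (0 : Nat)) (by simp)]
      simp
    | succ t =>
      have hhead : lookI (if w ∈ x.2 then [(s, (x.2.count w : Int))] else []) (s + ((t + 1 : Nat) : Int)) = 0 := by
        apply lookI_eq_zero
        intro p hp
        split at hp <;> simp_all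
        omega
      have harg : s + ((t + 1 : Nat) : Int) = (s + 1) + (t : Int) := by push_cast; ring
      rw [hhead, harg, ih (s + 1) t (by simpa using ht)]
      simp

theorem mem_streamB_fst (works : List (String × List String)) (w : String) :
    ∀ (s : Int) (t : Nat) (ht : t < works.length), w ∈ (works[t]'ht).2 →
      w ∈ (streamB works s).map (·.1) := by
  induction works with
  | nil => intro s t ht; simp at ht
  | cons x works ih =>
    intro s t ht hw
    have hstream : streamB (x :: works) s
        = (PySem.Dict.counter x.2).items.map (fun kv => (kv.1, (s, kv.2))) ++ streamB works (s + 1) := by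
      simp [streamB, PySem.List.enumerate_cons, List.flatMap_cons]
    rw [hstream, List.map_append, List.mem_append]
    cases t with
    | zero =>
      left
      rw [PySem.Dict.items_counter, List.map_map, List.map_map]
      have hmem : w ∈ PySem.Set.ofList x.2 := (PySem.Set.mem_ofList x.2 w).mpr (by simpa using hw)
      exact List.mem_map.mpr ⟨w, hmem, rfl⟩
    | succ t => exact Or.inr (ih (s + 1) t (by simpa using ht) (by simpa using hw))

-- A's inner generator sum, in closed form
theorem A_inner (ws1 ws2 : List String) :
    (PySem.Dict.counter ws1).items.foldl
        (fun s kv => s + kv.2 * (PySem.Dict.counter ws2).getD kv.1 0) 0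
      = ((PySem.Set.ofList ws1).map (fun k => (ws1.count k : Int) * (ws2.count k : Int))).sum := by
  have h1 : (PySem.Dict.counter ws1).items.foldl
      (fun (s : Int) (kv : String × Int) => s + kv.2 * (PySem.Dict.counter ws2).getD kv.1 0) 0
      = 0 + ((PySem.Dict.counter ws1).items.map
          (fun kv : String × Int => kv.2 * (PySem.Dict.counter ws2).getD kv.1 0)).sum :=
    PySem.List.foldl_add _ (fun kv : String × Int => kv.2 * (PySem.Dict.counter ws2).getD kv.1 0) 0
  rw [h1, zero_add, PySem.Dict.items_counter, List.map_map]
  congr 1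
  apply List.map_congr_left
  intro k _
  simp [PySem.Dict.getD_counter]

theorem sum_map_filter_ne_zero {α : Type} (f : α → Int) (l : List α) :
    (l.map f).sum = ((l.filter (fun w => !(f w == 0))).map f).sum := by
  induction l with
  | nil => rfl
  | cons x l ih =>
    by_cases h : f x = 0
    · simp [h, ih]
    · simp [h, ih]

theorem sum_map_eq_of_nodup {α : Type} [DecidableEq α] [BEq α] [LawfulBEq α]
    (f : α → Int) (D E : List α) (hD : D.Nodup) (hE : E.Nodup)
    (h : ∀ w, f w ≠ 0 → (w ∈ D ↔ w ∈ E)) : (D.map f).sum = (E.map f).sum := by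
  rw [sum_map_filter_ne_zero f D, sum_map_filter_ne_zero f E]
  have hperm : (D.filter (fun w => !(f w == 0))).Perm (E.filter (fun w => !(f w == 0))) := by
    apply List.perm_of_nodup_nodup_toFinset_eq (hD.filter _) (hE.filter _)
    ext w
    simp only [List.mem_toFinset, List.mem_filter, Bool.not_eq_eq_eq_not, Bool.not_true,
      beq_eq_false_iff_ne, ne_eq]
    constructor
    · rintro ⟨hw, hf⟩; exact ⟨(h w hf).mp hw, hf⟩
    · rintro ⟨hw, hf⟩; exact ⟨(h w hf).mpr hw, hf⟩
  exact (hperm.map f).sum_eq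

-- the central per-pair identity: B's accumulated entry is A's dot product
theorem pair_val (works : List (String × List String)) (i j : Nat)
    (hij : i < j) (hj : j < works.length) :
    (dotsB works).getD ((i : Int), (j : Int)) 0
      = ((PySem.Set.ofList (works[i]'(hij.trans hj)).2).map
          (fun k => (((works[i]'(hij.trans hj)).2.count k : Int)) * ((works[j]'hj).2.count k : Int))).sum := by
  have hi : i < works.length := hij.trans hj
  rw [dotsB_getD,
    PySem.Dict.values_eq_map_keys (indexB works) (nodup_keys_indexB works) [],
    keys_indexB, List.map_map]
  have hmap : ∀ w ∈ PySem.Set.ofList ((streamB works 0).map (·.1)),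
      (Sk ((i : Int), (j : Int)) ∘ fun k => (indexB works).getD k []) w
        = ((works[i]'hi).2.count w : Int) * ((works[j]'hj).2.count w : Int) := by
    intro w _
    show Sk ((i : Int), (j : Int)) ((indexB works).getD w []) = _
    rw [getD_indexB, Sk_eq_lookI (PwB works 0 w) (PwB_pairwise works 0 w) _ _ (by exact_mod_cast hij)]
    have h1 := lookI_PwB works w 0 i hi
    have h2 := lookI_PwB works w 0 j hj
    rw [zero_add] at h1 h2
    rw [h1, h2]
  rw [List.map_congr_left hmap]
  apply sum_map_eq_of_nodup _ _ _
    (PySem.Set.nodup_ofList _) (PySem.Set.nodup_ofList _)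
  intro w hf
  have hwi : w ∈ (works[i]'hi).2 := by
    by_contra hc
    have : (works[i]'hi).2.count w = 0 := List.count_eq_zero_of_not_mem hc
    simp [this] at hf
  constructor
  · intro _; exact (PySem.Set.mem_ofList _ w).mpr hwi
  · intro _
    exact (PySem.Set.mem_ofList _ w).mpr (mem_streamB_fst works w 0 i hi hwi)

theorem real_eq_real_alt (works : List (String × List String)) : real works = real_alt works := by
  unfold real real_alt
  congr 1
  congr 1
  apply PySem.List.foldl_congr_mem
  intro acc i hi
  apply PySem.List.foldl_congr_mem
  intro acc2 j hj
  dsimp only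
  rw [PySem.List.mem_pyRange_one, PySem.List.len_eq] at hi hj
  obtain ⟨hi0, hiu⟩ := hi
  obtain ⟨hj0, hju⟩ := hj
  have hju' : j < (works.length : Int) := hju
  have hj0' : (0 : Int) ≤ j := by omega
  have hiN : i = ((i.toNat : Nat) : Int) := by omega
  have hjN : j = ((j.toNat : Nat) : Int) := by omega
  have hiL : i.toNat < works.length := by omega
  have hjL : j.toNat < works.length := by omega
  have hijN : i.toNat < j.toNat := by omega
  rw [PySem.List.pyGetD_eq_getElem works ("", []) hi0 (by omega),
    PySem.List.pyGetD_eq_getElem works ("", []) hj0' hju']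
  congr 1
  rw [A_inner]
  have hpv := pair_val works i.toNat j.toNat hijN hjL
  rw [← hiN, ← hjN] at hpv
  exact hpv.symm


-- ===== VERDICT (by name: the statement is the Claim_ definition above) =====
theorem real_spec : Claim_equal_real := by
  intro works _
  unfold Spec_real
  exact real_eq_real_alt works
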